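-- pv_equiv track=rewrite | github.com/dhr7va/GeeksforGeeks-POTD-solutions | 2024/June/07-06-2024.py | maxOccured
-- ===== SOURCE A (Python) =====
-- def maxOccured(n, l, r, maxx):
--     freq = [0] * (maxx + 2)
--
--     for i in range(n):
--         freq[l[i]] += 1
--         freq[r[i] + 1] -= 1
--
--     max_occurrence = freq[0]
--     max_element = 0
--
--     for i in range(1, maxx + 1):
--         freq[i] += freq[i - 1]
--         if freq[i] > max_occurrence:
--             max_occurrence = freq[i]
--             max_element = i
--
--     return max_element
-- ===== SOURCE B (Python) =====
-- def maxOccured(n, l, r, maxx):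
--     # coverage at position p = (# ranges started at or before p) - (# ranges ended before p)
--     def cov(p):
--         started = sum(1 for i in range(n) if l[i] <= p)
--         ended = sum(1 for i in range(n) if r[i] + 1 <= p)
--         return started - ended
--     best_cov = cov(0)
--     best_pos = 0
--     for p in range(1, maxx + 1):
--         c = cov(p)
--         if c > best_cov:
--             best_cov, best_pos = c, p
--     return best_pos
-- ===== Notes on version B (the rewrite author's own statement) =====
-- stated objective: simpler
-- what changed: B drops the dense difference array and in-place prefix-sum pass entirely: coverage at each position is computed directly as (#starts <= p) - (#ends <= p) by counting over the ranges, and a single scan keeps the first strict improvement; shorter and plainer, but asymptotically slower.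
-- outside the precondition, e.g. on maxOccured(1, [-2], [-4], 1): A returns 1, B returns 0
import Mathlib
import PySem

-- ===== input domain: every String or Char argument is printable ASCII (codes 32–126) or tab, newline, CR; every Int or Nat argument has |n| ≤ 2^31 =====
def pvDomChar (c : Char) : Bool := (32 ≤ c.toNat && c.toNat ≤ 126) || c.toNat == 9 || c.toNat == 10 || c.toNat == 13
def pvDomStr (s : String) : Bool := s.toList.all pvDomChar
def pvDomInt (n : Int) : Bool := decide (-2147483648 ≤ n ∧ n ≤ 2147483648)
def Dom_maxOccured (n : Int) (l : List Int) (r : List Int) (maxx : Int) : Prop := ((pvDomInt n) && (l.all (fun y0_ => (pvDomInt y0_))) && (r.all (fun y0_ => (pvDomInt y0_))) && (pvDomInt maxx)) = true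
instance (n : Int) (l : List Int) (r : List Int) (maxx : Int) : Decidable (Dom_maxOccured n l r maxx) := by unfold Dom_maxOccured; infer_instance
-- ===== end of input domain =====

-- B replaces A's dense difference array + in-place prefix-sum pass by directly counting,
-- for each position, the ranges started/ended up to it (simpler, though asymptotically slower).


-- ===== PORT A =====
-- Python's freq list is a dense array with O(1) indexing: Array here. aGet/aSet are
-- hand-written ports of freq[i] read/write, exact (incl. negative-index wraparound) for
-- -len ≤ i < len; where Python raises IndexError (excluded by Pre_) they return 0 / no-op.
def aGet (xs : Array Int) (i : Int) : Int :=
  let j := if i < 0 then i + (xs.size : Int) else i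
  if h : 0 ≤ j ∧ j.toNat < xs.size then xs[j.toNat] else 0
def aSet (xs : Array Int) (i : Int) (v : Int) : Array Int :=
  let j := if i < 0 then i + (xs.size : Int) else i
  if 0 ≤ j then xs.setIfInBounds j.toNat v else xs

def maxOccured (n : Int) (l : List Int) (r : List Int) (maxx : Int) : Int :=
  let freq0 : Array Int := Array.replicate (maxx + 2).toNat 0
  let freq1 := (PySem.List.pyRange 0 n 1).foldl (fun freq i =>
      let li := PySem.List.pyGetD l i 0
      let freq := aSet freq li (aGet freq li + 1)
      let ri := PySem.List.pyGetD r i 0 + 1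
      aSet freq ri (aGet freq ri - 1)) freq0
  let st := (PySem.List.pyRange 1 (maxx + 1) 1).foldl (fun (st : Array Int × Int × Int) i =>
      let v := aGet st.1 i + aGet st.1 (i - 1)
      let freq := aSet st.1 i v
      if v > st.2.1 then (freq, v, i) else (freq, st.2.1, st.2.2))
    (freq1, aGet freq1 0, 0)
  st.2.2

-- ===== PORT B =====
-- coverage at position p = (# ranges started at or before p) - (# ranges ended before p)
def covAlt (n : Int) (l : List Int) (r : List Int) (p : Int) : Int :=
  let started := (PySem.List.pyRange 0 n 1).foldl
      (fun acc i => if PySem.List.pyGetD l i 0 ≤ p then acc + 1 else acc) 0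
  let ended := (PySem.List.pyRange 0 n 1).foldl
      (fun acc i => if PySem.List.pyGetD r i 0 + 1 ≤ p then acc + 1 else acc) 0
  started - ended

def maxOccured_alt (n : Int) (l : List Int) (r : List Int) (maxx : Int) : Int :=
  let st := (PySem.List.pyRange 1 (maxx + 1) 1).foldl (fun (st : Int × Int) p =>
      let c := covAlt n l r p
      if c > st.1 then (c, p) else st)
    (covAlt n l r 0, 0)
  st.2

-- ===== PRECONDITION & SPEC =====
-- Pre_ excludes (a) the inputs on which A raises IndexError (maxx ≤ -2; n exceeding a list
-- length; an index l[i] or r[i]+1 beyond maxx+1 or below -(maxx+2)) and (b) inputs where some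
-- l[i] or r[i]+1 among the first n is negative: there Python's negative indexing silently wraps
-- A's difference array around, an accident of the representation no caller would specify, while
-- B treats positions as plain integers.
def Pre_maxOccured (n : Int) (l : List Int) (r : List Int) (maxx : Int) : Prop :=
  -1 ≤ maxx ∧ n ≤ (l.length : Int) ∧ n ≤ (r.length : Int) ∧
  (∀ x ∈ l.take n.toNat, 0 ≤ x ∧ x ≤ maxx + 1) ∧
  (∀ x ∈ r.take n.toNat, -1 ≤ x ∧ x ≤ maxx)
instance (n : Int) (l : List Int) (r : List Int) (maxx : Int) : Decidable (Pre_maxOccured n l r maxx) := by unfold Pre_maxOccured; infer_instance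

def pvWitness_maxOccured : Int × List Int × List Int × Int := (2, [0, 1], [1, 1], 2)

def Spec_maxOccured (n : Int) (l : List Int) (r : List Int) (maxx : Int) (out : Int) : Prop := out = maxOccured_alt n l r maxx
instance (n : Int) (l : List Int) (r : List Int) (maxx : Int) (out : Int) : Decidable (Spec_maxOccured n l r maxx out) := by unfold Spec_maxOccured; infer_instance

-- ===== CLAIM (what is proved, stated in full; the proofs are below) =====
def Claim_equal_maxOccured : Prop := ∀ (n : Int) (l : List Int) (r : List Int) (maxx : Int), Dom_maxOccured n l r maxx → Pre_maxOccured n l r maxx → Spec_maxOccured n l r maxx (maxOccured n l r maxx)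
-- ===== LEMMAS AND PROOFS =====
theorem pvWitness_ok : Pre_maxOccured pvWitness_maxOccured.1 pvWitness_maxOccured.2.1 pvWitness_maxOccured.2.2.1 pvWitness_maxOccured.2.2.2 := by decide

-- reading after writing, both indices nonnegative and in range
theorem getD_setD (freq : Array Int) (i j v : Int) (hi0 : 0 ≤ i) (_hi : i < (freq.size : Int))
    (hj0 : 0 ≤ j) (hj : j < (freq.size : Int)) :
    aGet (aSet freq i v) j = if j = i then v else aGet freq j := by
  simp only [aGet, aSet, if_neg (show ¬ i < 0 by omega), if_pos hi0,
    if_neg (show ¬ j < 0 by omega)]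
  rw [dif_pos (show 0 ≤ j ∧ j.toNat < (freq.setIfInBounds i.toNat v).size by
        rw [Array.size_setIfInBounds]; omega)]
  rw [Array.getElem_setIfInBounds]
  by_cases h : j = i
  · rw [if_pos (by omega), if_pos h]
  · rw [if_neg (by omega), if_neg h, dif_pos (show 0 ≤ j ∧ j.toNat < freq.size by omega)]

theorem size_aSet (xs : Array Int) (i v : Int) : (aSet xs i v).size = xs.size := by
  unfold aSet
  simp [apply_ite Array.size, Array.size_setIfInBounds]

theorem covAlt_nonpos (n : Int) (l r : List Int) (p : Int) (hn : n ≤ 0) :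
    covAlt n l r p = 0 := by
  simp [covAlt, PySem.List.pyRange_one_eq_nil hn]

theorem covAlt_succ (k : Nat) (l r : List Int) (p : Int) :
    covAlt ((k : Int) + 1) l r p
      = covAlt (k : Int) l r p
        + (if PySem.List.pyGetD l (k : Int) 0 ≤ p then 1 else 0)
        - (if PySem.List.pyGetD r (k : Int) 0 + 1 ≤ p then 1 else 0) := by
  have hsplit : PySem.List.pyRange 0 ((k : Int) + 1) 1
      = PySem.List.pyRange 0 (k : Int) 1 ++ [(k : Int)] :=
    PySem.List.pyRange_one_succ_right (by positivity)
  simp only [covAlt, hsplit, List.foldl_append, List.foldl_cons, List.foldl_nil]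
  split_ifs <;> omega

theorem covAlt_neg_one_aux (n : Int) (l r : List Int)
    (hln : n ≤ (l.length : Int)) (hrn : n ≤ (r.length : Int))
    (hl : ∀ x ∈ l.take n.toNat, 0 ≤ x) (hr : ∀ x ∈ r.take n.toNat, -1 ≤ x) :
    ∀ k : Nat, (k : Int) ≤ n → covAlt (k : Int) l r (-1) = 0 := by
  intro k
  induction k with
  | zero => intro _; exact covAlt_nonpos 0 l r (-1) le_rfl
  | succ k ih =>
    intro hk
    have hk' : (k : Int) ≤ n := by push_cast at hk ⊢; omega
    have hkl : k < l.length := by omega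
    have hkr : k < r.length := by omega
    have hml : l[k] ∈ l.take n.toNat := by
      have hk2 : k < (l.take n.toNat).length := by simp; omega
      have hmem := List.getElem_mem hk2
      rwa [List.getElem_take] at hmem
    have hmr : r[k] ∈ r.take n.toNat := by
      have hk2 : k < (r.take n.toNat).length := by simp; omega
      have hmem := List.getElem_mem hk2
      rwa [List.getElem_take] at hmem
    have hgl : PySem.List.pyGetD l (k : Int) 0 = l[k] := by
      rw [PySem.List.pyGetD_eq_getElem l 0 (Int.natCast_nonneg k) (by exact_mod_cast hkl)]
      simp
    have hgr : PySem.List.pyGetD r (k : Int) 0 = r[k] := by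
      rw [PySem.List.pyGetD_eq_getElem r 0 (Int.natCast_nonneg k) (by exact_mod_cast hkr)]
      simp
    have h1 := covAlt_succ k l r (-1)
    rw [ih hk', hgl, hgr] at h1
    rw [show ((k + 1 : Nat) : Int) = (k : Int) + 1 by push_cast; ring, h1]
    rw [if_neg (by have := hl _ hml; omega), if_neg (by have := hr _ hmr; omega)]
    omega

theorem covAlt_neg_one (n : Int) (l r : List Int)
    (hln : n ≤ (l.length : Int)) (hrn : n ≤ (r.length : Int))
    (hl : ∀ x ∈ l.take n.toNat, 0 ≤ x) (hr : ∀ x ∈ r.take n.toNat, -1 ≤ x) :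
    covAlt n l r (-1) = 0 := by
  by_cases hn : n ≤ 0
  · exact covAlt_nonpos n l r (-1) hn
  · have h := covAlt_neg_one_aux n l r hln hrn hl hr n.toNat (by omega)
    rwa [Int.toNat_of_nonneg (by omega)] at h

-- proof-only helper names for the two fold bodies (definitionally equal to the ports' lambdas)
def buildStep (l r : List Int) (freq : Array Int) (i : Int) : Array Int :=
  let li := PySem.List.pyGetD l i 0
  let freq' := aSet freq li (aGet freq li + 1)
  let ri := PySem.List.pyGetD r i 0 + 1
  aSet freq' ri (aGet freq' ri - 1)

def scanStepA (st : Array Int × Int × Int) (i : Int) : Array Int × Int × Int :=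
  let v := aGet st.1 i + aGet st.1 (i - 1)
  let freq := aSet st.1 i v
  if v > st.2.1 then (freq, v, i) else (freq, st.2.1, st.2.2)

def scanStepB (n : Int) (l r : List Int) (st : Int × Int) (p : Int) : Int × Int :=
  let c := covAlt n l r p
  if c > st.1 then (c, p) else st

theorem pyGetD_self (l : List Int) (k : Nat) (hkl : k < l.length) :
    PySem.List.pyGetD l (k : Int) 0 = l[k] := by
  rw [PySem.List.pyGetD_eq_getElem l 0 (Int.natCast_nonneg k) (by exact_mod_cast hkl)]
  simp

theorem mem_take_self (l : List Int) (k N : Nat) (hk : k < N) (hkl : k < l.length) :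
    l[k] ∈ l.take N := by
  have hk2 : k < (l.take N).length := by simp; omega
  have hmem := List.getElem_mem hk2
  rwa [List.getElem_take] at hmem

theorem build_inv (n maxx : Int) (l r : List Int)
    (hln : n ≤ (l.length : Int)) (hrn : n ≤ (r.length : Int))
    (hl : ∀ x ∈ l.take n.toNat, 0 ≤ x ∧ x ≤ maxx + 1)
    (hr : ∀ x ∈ r.take n.toNat, -1 ≤ x ∧ x ≤ maxx) :
    ∀ (m : Nat) (k : Nat), (k : Int) ≤ n → (n - (k : Int)).toNat = m →
    ∀ freq : Array Int, (freq.size : Int) = maxx + 2 →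
    (∀ j : Int, 0 ≤ j → j ≤ maxx + 1 →
        aGet freq j = covAlt (k : Int) l r j - covAlt (k : Int) l r (j - 1)) →
    (((PySem.List.pyRange (k : Int) n 1).foldl (buildStep l r) freq).size : Int) = maxx + 2 ∧
    (∀ j : Int, 0 ≤ j → j ≤ maxx + 1 →
        aGet ((PySem.List.pyRange (k : Int) n 1).foldl (buildStep l r) freq) j
          = covAlt n l r j - covAlt n l r (j - 1)) := by
  intro m
  induction m with
  | zero =>
    intro k hk hm freq hlen hfreq
    have hnk : n = (k : Int) := by omega
    rw [PySem.List.pyRange_one_eq_nil (le_of_eq hnk)]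
    simp only [List.foldl_nil]
    rw [← hnk] at hfreq
    exact ⟨hlen, hfreq⟩
  | succ m ih =>
    intro k hk hm freq hlen hfreq
    have hkn : (k : Int) < n := by omega
    rw [PySem.List.pyRange_one_cons hkn, List.foldl_cons]
    have hkl : k < l.length := by omega
    have hkr : k < r.length := by omega
    set lk := PySem.List.pyGetD l (k : Int) 0 with hlkdef
    set rk := PySem.List.pyGetD r (k : Int) 0 with hrkdef
    have hbl : 0 ≤ lk ∧ lk ≤ maxx + 1 := by
      have := hl _ (mem_take_self l k n.toNat (by omega) hkl)
      rw [hlkdef, pyGetD_self l k hkl]; exact this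
    have hbr : -1 ≤ rk ∧ rk ≤ maxx := by
      have := hr _ (mem_take_self r k n.toNat (by omega) hkr)
      rw [hrkdef, pyGetD_self r k hkr]; exact this
    set freq' := aSet freq lk (aGet freq lk + 1) with hf'
    have hlen' : (freq'.size : Int) = maxx + 2 := by
      rw [hf', size_aSet]; exact hlen
    have hstep : buildStep l r freq (k : Int)
        = aSet freq' (rk + 1) (aGet freq' (rk + 1) - 1) := rfl
    have g1 : ∀ x : Int, 0 ≤ x → x ≤ maxx + 1 →
        aGet freq' x
          = aGet freq x + (if x = lk then 1 else 0) := by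
      intro x hx0 hx1
      rw [hf', getD_setD freq lk x _ hbl.1 (by omega) hx0 (by omega)]
      by_cases h : x = lk
      · rw [if_pos h, if_pos h, h]
      · rw [if_neg h, if_neg h]; omega
    have hlen2 : ((buildStep l r freq (k : Int)).size : Int) = maxx + 2 := by
      rw [hstep, size_aSet]; exact hlen'
    have hfreq2 : ∀ j : Int, 0 ≤ j → j ≤ maxx + 1 →
        aGet (buildStep l r freq (k : Int)) j
          = covAlt ((k : Int) + 1) l r j - covAlt ((k : Int) + 1) l r (j - 1) := by
      intro j hj0 hj1
      have eqA : aGet (buildStep l r freq (k : Int)) j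
          = aGet freq j + (if j = lk then 1 else 0)
            - (if j = rk + 1 then 1 else 0) := by
        rw [hstep, getD_setD freq' (rk + 1) j _ (by omega) (by omega) hj0 (by omega)]
        by_cases h : j = rk + 1
        · subst h
          rw [if_pos rfl, g1 (rk + 1) (by omega) (by omega)]
          split_ifs <;> omega
        · rw [if_neg h, g1 j hj0 hj1]
          split_ifs <;> omega
      have c1 := covAlt_succ k l r j
      have c2 := covAlt_succ k l r (j - 1)
      rw [← hlkdef, ← hrkdef] at c1 c2
      have hfj := hfreq j hj0 hj1
      rw [eqA, c1, c2, hfj]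
      split_ifs <;> omega
    have happ := ih (k + 1) (by push_cast; omega) (by omega)
      (buildStep l r freq (k : Int)) hlen2
      (by intro j hj0 hj1
          rw [hfreq2 j hj0 hj1]
          rw [show ((k + 1 : Nat) : Int) = (k : Int) + 1 by omega])
    rw [show ((k + 1 : Nat) : Int) = (k : Int) + 1 by omega] at happ
    exact happ

theorem scan_inv (n maxx : Int) (l r : List Int) :
    ∀ (k : Nat) (a : Int), a = maxx + 1 - (k : Int) → 1 ≤ a →
    ∀ (freq : Array Int) (occ el : Int),
    (freq.size : Int) = maxx + 2 →
    (∀ j : Int, 0 ≤ j → j ≤ maxx + 1 →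
        aGet freq j =
          if j < a then covAlt n l r j else covAlt n l r j - covAlt n l r (j - 1)) →
    ((PySem.List.pyRange a (maxx + 1) 1).foldl scanStepA (freq, occ, el)).2
      = (PySem.List.pyRange a (maxx + 1) 1).foldl (scanStepB n l r) (occ, el) := by
  intro k
  induction k with
  | zero =>
    intro a ha h1 freq occ el hlen hfreq
    rw [PySem.List.pyRange_one_eq_nil (by omega)]
    simp only [List.foldl_nil]
  | succ k ih =>
    intro a ha h1 freq occ el hlen hfreq
    by_cases hend : maxx + 1 ≤ a
    · rw [PySem.List.pyRange_one_eq_nil hend]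
      simp only [List.foldl_nil]
    · have hlt : a < maxx + 1 := by omega
      rw [PySem.List.pyRange_one_cons hlt, List.foldl_cons, List.foldl_cons]
      have hfa : aGet freq a = covAlt n l r a - covAlt n l r (a - 1) := by
        rw [hfreq a (by omega) (by omega), if_neg (by omega)]
      have hfa1 : aGet freq (a - 1) = covAlt n l r (a - 1) := by
        rw [hfreq (a - 1) (by omega) (by omega), if_pos (by omega)]
      have hv : aGet freq a + aGet freq (a - 1)
          = covAlt n l r a := by rw [hfa, hfa1]; ring
      have hstepA : scanStepA (freq, occ, el) a
          = (if covAlt n l r a > occ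
              then (aSet freq a (covAlt n l r a), covAlt n l r a, a)
              else (aSet freq a (covAlt n l r a), occ, el)) := by
        simp only [scanStepA, hv]
      have hstepB : scanStepB n l r (occ, el) a
          = (if covAlt n l r a > occ then (covAlt n l r a, a) else (occ, el)) := by
        simp only [scanStepB]
      have hfreq' : ∀ j : Int, 0 ≤ j → j ≤ maxx + 1 →
          aGet (aSet freq a (covAlt n l r a)) j =
            if j < a + 1 then covAlt n l r j else covAlt n l r j - covAlt n l r (j - 1) := by
        intro j hj0 hj1
        rw [getD_setD freq a j _ (by omega) (by omega) hj0 (by omega)]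
        by_cases h : j = a
        · rw [if_pos h, if_pos (by omega), h]
        · rw [if_neg h, hfreq j hj0 hj1]
          by_cases h2 : j < a
          · rw [if_pos h2, if_pos (by omega)]
          · rw [if_neg h2, if_neg (by omega)]
      have hlen' : ((aSet freq a (covAlt n l r a)).size : Int) = maxx + 2 := by
        rw [size_aSet]; exact hlen
      rw [hstepA, hstepB]
      split_ifs with hc
      · exact ih (a + 1) (by omega) (by omega) _ _ _ hlen' hfreq'
      · exact ih (a + 1) (by omega) (by omega) _ _ _ hlen' hfreq'

-- ===== VERDICT (by name: the statement is the Claim_ definition above) =====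
theorem maxOccured_spec : Claim_equal_maxOccured := by
  intro n l r maxx _hdom hpre
  obtain ⟨hm1, hln, hrn, hl, hr⟩ := hpre
  unfold Spec_maxOccured
  have hA : maxOccured n l r maxx
      = ((PySem.List.pyRange 1 (maxx + 1) 1).foldl scanStepA
          (((PySem.List.pyRange 0 n 1).foldl (buildStep l r)
              (Array.replicate (maxx + 2).toNat 0)),
           aGet ((PySem.List.pyRange 0 n 1).foldl (buildStep l r)
              (Array.replicate (maxx + 2).toNat 0)) 0, 0)).2.2 := rfl
  have hB : maxOccured_alt n l r maxx
      = ((PySem.List.pyRange 1 (maxx + 1) 1).foldl (scanStepB n l r)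
          (covAlt n l r 0, 0)).2 := rfl
  set freq0 : Array Int := Array.replicate (maxx + 2).toNat 0 with hf0
  have hlen0 : (freq0.size : Int) = maxx + 2 := by
    rw [hf0, Array.size_replicate]; omega
  have hget0 : ∀ j : Int, 0 ≤ j → j ≤ maxx + 1 → aGet freq0 j = 0 := by
    intro j hj0 hj1
    simp only [aGet, if_neg (show ¬ j < 0 by omega)]
    rw [dif_pos (show 0 ≤ j ∧ j.toNat < freq0.size by omega)]
    simp [hf0]
  set freq1 := (PySem.List.pyRange 0 n 1).foldl (buildStep l r) freq0 with hf1
  have hbuilt : (freq1.size : Int) = maxx + 2 ∧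
      (∀ j : Int, 0 ≤ j → j ≤ maxx + 1 →
        aGet freq1 j = covAlt n l r j - covAlt n l r (j - 1)) := by
    by_cases hn : 0 ≤ n
    · have h := build_inv n maxx l r hln hrn hl hr n.toNat 0 (by omega) (by omega)
        freq0 hlen0
        (by intro j hj0 hj1
            rw [hget0 j hj0 hj1,
              covAlt_nonpos ((0 : Nat) : Int) l r j (by omega),
              covAlt_nonpos ((0 : Nat) : Int) l r (j - 1) (by omega)]
            omega)
      rw [hf1]
      rw [show ((0 : Nat) : Int) = 0 from rfl] at h
      exact h
    · have hnil : PySem.List.pyRange 0 n 1 = [] := PySem.List.pyRange_one_eq_nil (by omega)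
      rw [hf1, hnil]
      simp only [List.foldl_nil]
      refine ⟨hlen0, fun j hj0 hj1 => ?_⟩
      rw [hget0 j hj0 hj1, covAlt_nonpos n l r j (by omega),
        covAlt_nonpos n l r (j - 1) (by omega)]
      omega
  have hcovm1 : covAlt n l r (-1) = 0 :=
    covAlt_neg_one n l r hln hrn (fun x hx => (hl x hx).1) (fun x hx => (hr x hx).1)
  have hocc : aGet freq1 0 = covAlt n l r 0 := by
    rw [hbuilt.2 0 le_rfl (by omega)]
    rw [show (0 : Int) - 1 = -1 by ring, hcovm1]
    ring
  rw [hA, hB, hocc]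
  by_cases hmx : maxx + 1 ≤ 1
  · rw [PySem.List.pyRange_one_eq_nil hmx]
    simp only [List.foldl_nil]
  · have := scan_inv n maxx l r maxx.toNat 1 (by omega) le_rfl freq1
      (covAlt n l r 0) 0 hbuilt.1
      (by intro j hj0 hj1
          rw [hbuilt.2 j hj0 hj1]
          by_cases h : j < 1
          · rw [if_pos h]
            have hj00 : j = 0 := by omega
            rw [hj00, show (0 : Int) - 1 = -1 by ring, hcovm1]
            ring
          · rw [if_neg h])
    rw [show ((PySem.List.pyRange 1 (maxx + 1) 1).foldl scanStepA
        (freq1, covAlt n l r 0, 0)).2.2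
      = (((PySem.List.pyRange 1 (maxx + 1) 1).foldl scanStepA
        (freq1, covAlt n l r 0, 0)).2).2 from rfl, this]
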